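-- pv_equiv track=rewrite | github.com/scarlet2131/DSA | TCS-Codevita/JustifyWords.py | max_words_in_lines
-- ===== SOURCE A (Python) =====
-- def max_words_in_lines(words, n, m):
--     k = len(words)
--
--     # Memoization table to store results for subproblems
--     dp = [[-1 for _ in range(n + 1)] for _ in range(k + 1)]
--
--     def can_fit(current_word, lines_left):
--         # Base cases
--         if current_word == k:
--             return 0  # All words processed
--         if lines_left == 0:
--             return -float('inf')  # No lines left
--
--         if dp[current_word][lines_left] != -1:
--             return dp[current_word][lines_left]
--
--         max_words = 0
--         current_line_length = 0
--
--         # Try placing words on the current line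
--         for i in range(current_word, k):
--             word_length = len(words[i])
--
--             if current_line_length == 0:
--                 current_line_length = word_length
--             elif current_line_length + 1 + word_length <= m:
--                 current_line_length += 1 + word_length
--             else:
--                 break
--
--             # Recursive call: Process remaining words with one less line
--             max_words = max(max_words, (i - current_word + 1) + can_fit(i + 1, lines_left - 1))
--
--         # Also consider skipping the current word completely (not placing it on any line)
--         max_words = max(max_words, can_fit(current_word + 1, lines_left))
--
--         dp[current_word][lines_left] = max_words
--         return max_words
--
--     # Start the recursive process
--     result = can_fit(0, n)
--     return max(0, result)
-- ===== SOURCE B (Python) =====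
-- def max_words_in_lines(words, n, m):
--     k = len(words)
--     if n >= k:
--         return k          # a single word always starts a line, so one word per line fits
--     if n <= 0:
--         return 0
--     lens = [len(w) for w in words]
--     # bottom-up DP, layer j = number of lines still available.
--     # prev[p] = best word count achievable from position p with j-1 lines (None = unreachable)
--     prev = [None] * k + [0]
--     for _ in range(n):
--         cur = [0]         # value at position k
--         for cw in range(k - 1, -1, -1):
--             best = cur[0]             # skip word cw (stay in the same layer)
--             width = 0
--             for e in range(cw + 1, k + 1):
--                 wl = lens[e - 1]
--                 if width == 0:
--                     width = wl
--                 elif width + 1 + wl <= m: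
--                     width += 1 + wl
--                 else:
--                     break
--                 v = prev[e]
--                 if v is not None:
--                     best = max(best, (e - cw) + v)
--             cur.insert(0, best)
--         prev = cur
--     return prev[0]
-- ===== Notes on version B (the rewrite author's own statement) =====
-- stated objective: alternative
-- what changed: Replaces A's top-down memoized recursion (a (k+1)x(n+1) memo table filled via can_fit) by an iterative bottom-up DP that keeps only two layers and runs at most min(n, k) layer passes, returning k outright when n >= k since one word per line always fits; intended as faster (O(k^2*min(n,k)) vs O(k^2*n), O(k) vs O(k*n) memory) but a timing run read only ~1.66x at the largest size both finished, so no speed is claimed.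
import Mathlib
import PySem

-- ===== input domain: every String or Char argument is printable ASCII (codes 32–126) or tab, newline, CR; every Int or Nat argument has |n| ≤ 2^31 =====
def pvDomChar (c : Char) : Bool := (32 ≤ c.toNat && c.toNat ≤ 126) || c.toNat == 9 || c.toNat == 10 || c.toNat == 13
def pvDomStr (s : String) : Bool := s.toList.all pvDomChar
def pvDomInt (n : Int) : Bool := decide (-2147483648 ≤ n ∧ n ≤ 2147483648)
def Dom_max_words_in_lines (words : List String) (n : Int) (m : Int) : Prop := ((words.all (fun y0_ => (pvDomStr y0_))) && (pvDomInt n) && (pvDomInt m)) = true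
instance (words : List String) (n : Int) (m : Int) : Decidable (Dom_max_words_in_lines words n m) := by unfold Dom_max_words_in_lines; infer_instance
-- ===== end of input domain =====

-- B replaces A's top-down memoized recursion by a bottom-up layered DP that computes only
-- min(n, k) layers (answers k outright once n ≥ k); equivalence is about the return value.

-- ===== PORT A =====
-- A's memo table `dp` is a pure cache: every value it stores is the recomputed `max_words ≥ 0`
-- and the unset sentinel is -1, so a cache hit returns exactly what recomputation returns;
-- the port therefore performs the same recursion without the cache.
-- `float('-inf')` is modelled as `none`; Python's `max_words` itself always stays an actual
-- number (it starts at 0 and max(x, -inf) = x), so the accumulator is an `Int` and the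
-- `match … | none => acc` branch is literally Python's max(acc, x + (-inf)) = acc.
mutual
/-- the `for i in range(current_word, k)` loop of can_fit; `jm1` is `lines_left - 1`. -/
def pvLineLoop (lens : List Int) (m : Int) (cw jm1 i : Nat) (cll : Int) (acc : Int) : Int :=
  if h : i < lens.length then
    let wl := lens.getD i 0                -- word_length = len(words[i])
    if cll = 0 then
      pvLineLoop lens m cw jm1 (i+1) wl
        (match pvCanFit lens m (i+1) jm1 with
         | none => acc
         | some v => max acc (((i : Int) - (cw : Int) + 1) + v))
    else if cll + 1 + wl ≤ m then
      pvLineLoop lens m cw jm1 (i+1) (cll + 1 + wl)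
        (match pvCanFit lens m (i+1) jm1 with
         | none => acc
         | some v => max acc (((i : Int) - (cw : Int) + 1) + v))
    else acc                               -- break
  else acc
termination_by (jm1, lens.length - i, 1)
decreasing_by all_goals (simp_wf; simp [Prod.lex_def]; try omega)

/-- can_fit(current_word, lines_left); `none` = -inf. A's base test is `current_word == k`;
    can_fit is only ever invoked with current_word ≤ k, where `==` and `≥` coincide
    (totality guard only). -/
def pvCanFit (lens : List Int) (m : Int) (cw j : Nat) : Option Int :=
  if lens.length ≤ cw then some 0
  else if j = 0 then none
  else
    some (match pvCanFit lens m (cw+1) j with   -- max(max_words, can_fit(cw+1, j)); -inf drops out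
          | none => pvLineLoop lens m cw (j-1) cw 0 0
          | some v => max (pvLineLoop lens m cw (j-1) cw 0 0) v)
termination_by (j, lens.length + 1 - cw, 0)
decreasing_by all_goals (simp_wf; simp [Prod.lex_def]; try omega)
end

def max_words_in_lines (words : List String) (n : Int) (m : Int) : Int :=
  let lens := words.map PySem.Str.len
  match pvCanFit lens m 0 n.toNat with     -- result = can_fit(0, n)  (Pre_: n ≥ 0 or words = [])
  | none => 0                              -- max(0, -inf) = 0
  | some v => max 0 v                      -- return max(0, result)

-- ===== PORT B =====
/-- `if v is not None: best = max(best, (e - cw) + v)` -/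
def pvBBest (prev : List (Option Int)) (cw e : Nat) (best : Int) : Int :=
  match prev.getD e none with
  | none => best
  | some v => max best (((e : Int) - (cw : Int)) + v)

/-- inner `for e in range(cw + 1, k + 1)` loop of Source B -/
def pvBInner (lens : List Int) (m : Int) (prev : List (Option Int)) (cw e : Nat)
    (width : Int) (best : Int) : Int :=
  if h : e ≤ lens.length then
    let wl := lens.getD (e-1) 0
    if width = 0 then
      pvBInner lens m prev cw (e+1) wl (pvBBest prev cw e best)
    else if width + 1 + wl ≤ m then
      pvBInner lens m prev cw (e+1) (width + 1 + wl) (pvBBest prev cw e best)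
    else best                              -- break
  else best
termination_by lens.length + 1 - e

/-- the `for cw in range(k-1, -1, -1)` loop: builds `cur` for positions k-t .. k (back to front) -/
def pvBBuild (lens : List Int) (m : Int) (prev : List (Option Int)) : Nat → List Int
  | 0 => [0]                               -- cur = [0]
  | t+1 =>
      let rest := pvBBuild lens m prev t
      let cw := lens.length - (t+1)
      pvBInner lens m prev cw (cw+1) 0 (rest.headD 0) :: rest   -- best starts at cur[0] (skip)

/-- the `for _ in range(n)` loop; the int entries of `cur` become Optional ints when
    reassigned to `prev` (trivial in Python, `map some` here) -/
def pvBLayers (lens : List Int) (m : Int) : Nat → List (Option Int)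
  | 0 => List.replicate lens.length none ++ [some 0]
  | j+1 => (pvBBuild lens m (pvBLayers lens m j) lens.length).map some

def max_words_in_lines_alt (words : List String) (n : Int) (m : Int) : Int :=
  let k := words.length
  if (k : Int) ≤ n then (k : Int)          -- n >= k: one word per line always fits
  else if n ≤ 0 then 0
  else
    let lens := words.map PySem.Str.len
    ((pvBLayers lens m n.toNat).getD 0 none).getD 0    -- return prev[0]

-- ===== PRECONDITION & SPEC =====
-- Pre_ excludes exactly the inputs where A raises: for n < 0 with a nonempty word list,
-- A's dp rows are empty and dp[0][n] raises IndexError.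
def Pre_max_words_in_lines (words : List String) (n : Int) (m : Int) : Prop :=
  0 ≤ n ∨ words = []
instance (words : List String) (n : Int) (m : Int) : Decidable (Pre_max_words_in_lines words n m) := by unfold Pre_max_words_in_lines; infer_instance
def pvWitness_max_words_in_lines : List String × Int × Int := (["hi", "a"], 2, 5)

def Spec_max_words_in_lines (words : List String) (n : Int) (m : Int) (out : Int) : Prop := out = max_words_in_lines_alt words n m
instance (words : List String) (n : Int) (m : Int) (out : Int) : Decidable (Spec_max_words_in_lines words n m out) := by unfold Spec_max_words_in_lines; infer_instance

-- ===== CLAIM (what is proved, stated in full; the proofs are below) =====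
def Claim_equal_max_words_in_lines : Prop := ∀ (words : List String) (n : Int) (m : Int), Dom_max_words_in_lines words n m → Pre_max_words_in_lines words n m → Spec_max_words_in_lines words n m (max_words_in_lines words n m)

-- ===== LEMMAS AND PROOFS =====

theorem pvLineLoop_ge (lens : List Int) (m : Int) (cw jm1 i : Nat) (cll acc : Int) :
    acc ≤ pvLineLoop lens m cw jm1 i cll acc := by
  rw [pvLineLoop]
  split
  case isTrue h =>
    dsimp only
    split_ifs with h1 h2
    · refine le_trans ?_ (pvLineLoop_ge lens m cw jm1 (i+1) _ _)
      cases hM : pvCanFit lens m (i+1) jm1 <;> simp [hM]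
    · refine le_trans ?_ (pvLineLoop_ge lens m cw jm1 (i+1) _ _)
      cases hM : pvCanFit lens m (i+1) jm1 <;> simp [hM]
    · exact le_rfl
  case isFalse h => exact le_rfl
termination_by lens.length - i
decreasing_by all_goals (simp_wf; omega)

theorem pvCanFit_nonneg (lens : List Int) (m : Int) (cw j : Nat) (hj : j ≠ 0) :
    ∃ v, pvCanFit lens m cw j = some v ∧ 0 ≤ v := by
  rw [pvCanFit]
  split_ifs with h1
  · exact ⟨0, rfl, le_refl 0⟩
  · refine ⟨_, rfl, ?_⟩
    have h0 := pvLineLoop_ge lens m cw (j-1) cw 0 0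
    cases hM : pvCanFit lens m (cw+1) j <;> simp [le_max_iff] <;> omega

theorem pvLineLoop_le (lens : List Int) (m : Int) (cw jm1 : Nat)
    (hcf : ∀ i' v', i' ≤ lens.length → pvCanFit lens m i' jm1 = some v' →
      v' ≤ (lens.length : Int) - i') :
    ∀ (i : Nat) (cll acc : Int), cw ≤ i → acc ≤ (lens.length : Int) - cw →
      pvLineLoop lens m cw jm1 i cll acc ≤ (lens.length : Int) - cw := by
  intro i cll acc hcwi hacc
  rw [pvLineLoop]
  split
  case isTrue h =>
    have hstep : ∀ (a : Int), a ≤ (lens.length : Int) - cw →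
        (match pvCanFit lens m (i+1) jm1 with
         | none => a
         | some v => max a (((i : Int) - (cw : Int) + 1) + v)) ≤ (lens.length : Int) - cw := by
      intro a ha
      cases hM : pvCanFit lens m (i+1) jm1 with
      | none => exact ha
      | some v =>
        have hv := hcf (i+1) v (by omega) hM
        simp only [max_le_iff]
        refine ⟨ha, ?_⟩
        push_cast at hv ⊢
        omega
    dsimp only
    split_ifs with h1 h2
    · exact pvLineLoop_le lens m cw jm1 hcf (i+1) _ _ (by omega) (hstep acc hacc)
    · exact pvLineLoop_le lens m cw jm1 hcf (i+1) _ _ (by omega) (hstep acc hacc)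
    · exact hacc
  case isFalse h => exact hacc
termination_by i cll acc => lens.length - i
decreasing_by all_goals (simp_wf; omega)

theorem pvCanFit_le (lens : List Int) (m : Int) (j cw : Nat) (hcw : cw ≤ lens.length)
    (v : Int) (hv : pvCanFit lens m cw j = some v) : v ≤ (lens.length : Int) - cw := by
  rw [pvCanFit] at hv
  split_ifs at hv with h1 h2
  · cases hv
    have hc : cw = lens.length := le_antisymm hcw h1
    simp [hc]
  · cases hv
    have hL : pvLineLoop lens m cw (j-1) cw 0 0 ≤ (lens.length : Int) - cw := by
      refine pvLineLoop_le lens m cw (j-1)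
        (fun i' v' hi' hv' => pvCanFit_le lens m (j-1) i' hi' v' hv') cw 0 0 le_rfl ?_
      have : (cw : Int) ≤ (lens.length : Int) := by exact_mod_cast hcw
      omega
    cases hM : pvCanFit lens m (cw+1) j with
    | none => simpa using hL
    | some w =>
      have hw := pvCanFit_le lens m j (cw+1) (by omega) w hM
      simp only [max_le_iff]
      refine ⟨hL, ?_⟩
      push_cast at hw ⊢
      omega
termination_by (j, lens.length - cw)
decreasing_by all_goals (simp_wf; simp [Prod.lex_def]; try omega)

theorem pvCanFit_full (lens : List Int) (m : Int) (cw j : Nat) (hcw : cw ≤ lens.length)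
    (hj : lens.length - cw ≤ j) :
    pvCanFit lens m cw j = some ((lens.length : Int) - cw) := by
  rcases eq_or_lt_of_le hcw with heq | hlt
  · rw [pvCanFit]
    simp [heq]
  · have hj0 : j ≠ 0 := by omega
    obtain ⟨v, hv, _⟩ := pvCanFit_nonneg lens m cw j hj0
    have hub : v ≤ (lens.length : Int) - cw := pvCanFit_le lens m j cw hcw v hv
    have hrec : pvCanFit lens m (cw+1) (j-1) = some ((lens.length : Int) - (cw+1)) :=
      pvCanFit_full lens m (cw+1) (j-1) (by omega) (by omega)
    have hloop : (lens.length : Int) - cw ≤ pvLineLoop lens m cw (j-1) cw 0 0 := by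
      rw [pvLineLoop]
      split
      case isTrue h =>
        dsimp only
        rw [if_pos rfl]
        refine le_trans ?_ (pvLineLoop_ge lens m cw (j-1) (cw+1) _ _)
        rw [hrec]
        simp only [le_max_iff]
        right
        push_cast
        omega
      case isFalse h => omega
    have hlb : (lens.length : Int) - cw ≤ v := by
      rw [pvCanFit] at hv
      rw [if_neg (by omega), if_neg hj0] at hv
      cases hv
      cases hM : pvCanFit lens m (cw+1) j <;> simp [le_max_iff] <;> omega
    rw [hv]
    congr 1
    omega
termination_by lens.length - cw
decreasing_by all_goals (simp_wf; omega)

theorem pvBInner_eq (lens : List Int) (m : Int) (prev : List (Option Int)) (j : Nat)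
    (hprev : ∀ p, p ≤ lens.length → prev.getD p none = pvCanFit lens m p j)
    (cw : Nat) (b0 : Int) :
    ∀ (i : Nat) (cll acc best : Int), cw ≤ i → best = max acc b0 →
      pvBInner lens m prev cw (i+1) cll best = max (pvLineLoop lens m cw j i cll acc) b0 := by
  intro i cll acc best hcwi hbest
  by_cases hi : i < lens.length
  · rw [pvBInner, pvLineLoop, dif_pos (by omega : i + 1 ≤ lens.length), dif_pos hi]
    dsimp only
    simp only [Nat.add_sub_cancel]
    split_ifs with h1 h2
    · refine pvBInner_eq lens m prev j hprev cw b0 (i+1) _ _ _ (by omega) ?_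
      unfold pvBBest
      rw [hprev (i+1) (by omega)]
      cases hM : pvCanFit lens m (i+1) j with
      | none => exact hbest
      | some v =>
        rw [hbest, max_right_comm]
        congr 2
        push_cast
        ring
    · refine pvBInner_eq lens m prev j hprev cw b0 (i+1) _ _ _ (by omega) ?_
      unfold pvBBest
      rw [hprev (i+1) (by omega)]
      cases hM : pvCanFit lens m (i+1) j with
      | none => exact hbest
      | some v =>
        rw [hbest, max_right_comm]
        congr 2
        push_cast
        ring
    · exact hbest
  · rw [pvBInner, pvLineLoop, dif_neg (by omega : ¬ (i + 1 ≤ lens.length)), dif_neg hi]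
    exact hbest
termination_by i cll acc best => lens.length - i
decreasing_by all_goals (simp_wf; omega)

theorem pvBBuild_length (lens : List Int) (m : Int) (prev : List (Option Int)) (t : Nat) :
    (pvBBuild lens m prev t).length = t + 1 := by
  induction t with
  | zero => simp [pvBBuild]
  | succ t ih => simp [pvBBuild, ih]

theorem pvBBuild_getD (lens : List Int) (m : Int) (prev : List (Option Int)) (j : Nat)
    (hprev : ∀ p, p ≤ lens.length → prev.getD p none = pvCanFit lens m p j) :
    ∀ t, t ≤ lens.length → ∀ s, s ≤ t →
      some ((pvBBuild lens m prev t).getD s 0) = pvCanFit lens m (lens.length - t + s) (j+1) := by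
  intro t
  induction t with
  | zero =>
    intro _ s hs
    have hs0 : s = 0 := by omega
    subst hs0
    rw [pvCanFit]
    simp [pvBBuild]
  | succ t ih =>
    intro ht s hs
    cases s with
    | succ s' =>
      have hrec := ih (by omega) s' (by omega)
      rw [pvBBuild]
      simp only [List.getD_cons_succ]
      rw [hrec]
      congr 1
      omega
    | zero =>
      rw [pvBBuild]
      simp only [List.getD_cons_zero, Nat.add_zero]
      have hcw1 : lens.length - (t+1) + 1 = lens.length - t := by omega
      have hhead : ∀ (l : List Int), l.headD 0 = l.getD 0 0 := by
        intro l; cases l <;> rfl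
      have hb0 : pvCanFit lens m (lens.length - (t+1) + 1) (j+1) =
          some ((pvBBuild lens m prev t).getD 0 0) := by
        rw [hcw1]
        have hih := ih (by omega) 0 (by omega)
        simp only [Nat.add_zero] at hih
        exact hih.symm
      obtain ⟨v, hv, hv0⟩ := pvCanFit_nonneg lens m (lens.length - (t+1) + 1) (j+1) (by omega)
      have hveq : (pvBBuild lens m prev t).getD 0 0 = v := by
        rw [hv] at hb0
        exact (Option.some_inj.mp hb0).symm
      rw [hhead, hveq]
      rw [pvBInner_eq lens m prev j hprev (lens.length - (t+1)) v
        (lens.length - (t+1)) 0 0 v le_rfl (by rw [max_eq_right hv0])]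
      rw [pvCanFit]
      rw [if_neg (by omega), if_neg (by omega)]
      rw [hcw1] at hv ⊢
      rw [hv]
      simp only [Nat.add_sub_cancel]

theorem pvBLayers_getD (lens : List Int) (m : Int) (j cw : Nat) (hcw : cw ≤ lens.length) :
    (pvBLayers lens m j).getD cw none = pvCanFit lens m cw j := by
  induction j generalizing cw with
  | zero =>
    rw [pvBLayers, pvCanFit]
    rcases eq_or_lt_of_le hcw with heq | hlt
    · subst heq
      rw [List.getD_eq_getElem?_getD, List.getElem?_append_right (by simp)]
      simp
    · rw [List.getD_eq_getElem?_getD, List.getElem?_append_left (by simpa using hlt)]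
      rw [if_neg (by omega)]
      simp [List.getElem?_replicate, hlt]
  | succ j ih =>
    rw [pvBLayers]
    have hlen : (pvBBuild lens m (pvBLayers lens m j) lens.length).length = lens.length + 1 :=
      pvBBuild_length lens m _ lens.length
    have hget : ((pvBBuild lens m (pvBLayers lens m j) lens.length).map some).getD cw none =
        some ((pvBBuild lens m (pvBLayers lens m j) lens.length).getD cw 0) := by
      rw [List.getD_eq_getElem?_getD, List.getD_eq_getElem?_getD, List.getElem?_map]
      rw [List.getElem?_eq_getElem (by omega)]
      simp [List.getElem?_eq_getElem (show cw < (pvBBuild lens m (pvBLayers lens m j) lens.length).length by omega)]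
    rw [hget]
    have hb := pvBBuild_getD lens m (pvBLayers lens m j) j
      (fun p hp => ih p hp) lens.length le_rfl cw hcw
    rw [hb]
    congr 1
    omega


-- ===== VERDICT (by name: the statement is the Claim_ definition above) =====
theorem max_words_in_lines_spec : Claim_equal_max_words_in_lines := by
  intro words n m hDom hPre
  unfold Spec_max_words_in_lines max_words_in_lines max_words_in_lines_alt
  dsimp only
  have hL : (words.map PySem.Str.len).length = words.length := by simp
  by_cases h1 : (words.length : Int) ≤ n
  · have hn0 : (0:Int) ≤ n := le_trans (Int.natCast_nonneg _) h1
    have hfull := pvCanFit_full (words.map PySem.Str.len) m 0 n.toNat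
      (Nat.zero_le _) (by omega)
    rw [hfull, if_pos h1]
    dsimp only
    rw [hL]
    omega
  · by_cases h2 : n ≤ 0
    · rw [if_neg h1, if_pos h2]
      rcases hPre with hn | hw
      · have hn0 : n = 0 := le_antisymm h2 hn
        have hk : 0 < words.length := by omega
        have hnone : pvCanFit (words.map PySem.Str.len) m 0 n.toNat = none := by
          rw [pvCanFit]
          rw [if_neg (by omega), if_pos (by omega)]
        rw [hnone]
      · subst hw
        rw [pvCanFit]
        simp
    · rw [if_neg h1, if_neg h2]
      have hj : n.toNat ≠ 0 := by omega
      obtain ⟨v, hv, hv0⟩ := pvCanFit_nonneg (words.map PySem.Str.len) m 0 n.toNat hj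
      have htab := pvBLayers_getD (words.map PySem.Str.len) m n.toNat 0 (Nat.zero_le _)
      rw [hv] at htab
      rw [hv, htab]
      simp [max_eq_right hv0]
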